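-- pv_equiv track=rewrite | github.com/hosseinim018/mehmonshobot | panel/tasks.py | distribute_prizes
-- ===== SOURCE A (Python) =====
-- def distribute_prizes(total_collected, max_prize = 3_000_000):
--     prizes = []
--     remaining = total_collected
--     while remaining > 0:
--         current_prize = min(remaining, max_prize)
--         prizes.append(current_prize)
--         remaining -= current_prize
--     return prizes
-- ===== SOURCE B (Python) =====
-- def distribute_prizes(total_collected, max_prize=3_000_000):
--     if total_collected <= 0:
--         return []
--     q, r = divmod(total_collected, max_prize)
--     return [max_prize] * q + ([r] if r else [])
-- ===== Notes on version B (the rewrite author's own statement) =====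
-- stated objective: simpler
-- what changed: Replaces the subtract-until-zero loop with a closed-form divmod: q full chunks of max_prize plus the nonzero remainder.
import Mathlib
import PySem

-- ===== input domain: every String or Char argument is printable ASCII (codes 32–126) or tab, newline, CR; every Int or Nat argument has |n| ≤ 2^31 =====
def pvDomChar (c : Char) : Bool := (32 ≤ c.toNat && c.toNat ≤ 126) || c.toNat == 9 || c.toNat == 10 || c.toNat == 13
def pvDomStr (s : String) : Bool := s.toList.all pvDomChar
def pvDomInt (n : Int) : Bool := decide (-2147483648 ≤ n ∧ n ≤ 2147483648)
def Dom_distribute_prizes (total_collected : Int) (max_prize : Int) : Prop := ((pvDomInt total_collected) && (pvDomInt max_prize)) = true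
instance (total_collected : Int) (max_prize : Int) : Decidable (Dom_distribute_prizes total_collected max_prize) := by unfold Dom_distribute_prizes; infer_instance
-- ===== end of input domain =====

-- B replaces A's subtract-until-zero loop with a closed-form divmod (q full chunks plus remainder); objective: simpler.


-- ===== PORT A =====
-- A's while-loop: append min(remaining, max_prize) and subtract, until remaining ≤ 0.
-- The 'max_prize > 0' conjunct in the guard is a totality guard only: Python A diverges
-- on remaining > 0 ∧ max_prize ≤ 0, and those inputs are excluded by Pre_.
def distributeLoop (remaining : Int) (max_prize : Int) : List Int :=
  if h : 0 < remaining ∧ 0 < max_prize then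
    let current_prize := min remaining max_prize
    current_prize :: distributeLoop (remaining - current_prize) max_prize
  else []
termination_by remaining.toNat
decreasing_by
  have h1 : 0 < min remaining max_prize := lt_min h.1 h.2
  omega

def distribute_prizes (total_collected : Int) (max_prize : Int) : List Int :=
  distributeLoop total_collected max_prize

-- ===== PORT B =====
def distribute_prizes_alt (total_collected : Int) (max_prize : Int) : List Int :=
  if total_collected ≤ 0 then []
  else
    let q := PySem.Int.floordiv total_collected max_prize
    let r := PySem.Int.mod total_collected max_prize
    List.replicate q.toNat max_prize ++ (if r ≠ 0 then [r] else [])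

-- ===== PRECONDITION & SPEC =====
-- Pre_ excludes only total_collected > 0 ∧ max_prize ≤ 0: there Python A never returns
-- (the while loop cannot make progress), and B raises ZeroDivisionError for max_prize = 0.
def Pre_distribute_prizes (total_collected : Int) (max_prize : Int) : Prop :=
  total_collected ≤ 0 ∨ 0 < max_prize
instance (total_collected : Int) (max_prize : Int) : Decidable (Pre_distribute_prizes total_collected max_prize) := by unfold Pre_distribute_prizes; infer_instance

def pvWitness_distribute_prizes : Int × Int := (7500000, 3000000)

def Spec_distribute_prizes (total_collected : Int) (max_prize : Int) (out : List Int) : Prop := out = distribute_prizes_alt total_collected max_prize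
instance (total_collected : Int) (max_prize : Int) (out : List Int) : Decidable (Spec_distribute_prizes total_collected max_prize out) := by unfold Spec_distribute_prizes; infer_instance

-- ===== CLAIM (what is proved, stated in full; the proofs are below) =====
def Claim_equal_distribute_prizes : Prop := ∀ (total_collected : Int) (max_prize : Int), Dom_distribute_prizes total_collected max_prize → Pre_distribute_prizes total_collected max_prize → Spec_distribute_prizes total_collected max_prize (distribute_prizes total_collected max_prize)

-- ===== LEMMAS AND PROOFS =====

theorem distributeLoop_eq_alt (n : Nat) :
    ∀ (t m : Int), t.toNat ≤ n → 0 < m →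
      distributeLoop t m = distribute_prizes_alt t m := by
  induction n with
  | zero =>
    intro t m ht hm
    have ht' : t ≤ 0 := by omega
    have hg : ¬ (0 < t ∧ 0 < m) := by omega
    rw [distributeLoop]
    simp [distribute_prizes_alt, ht', hg]
  | succ n ih =>
    intro t m ht hm
    rw [distributeLoop]
    by_cases hpos : 0 < t
    · simp only [dif_pos (And.intro hpos hm)]
      rw [distribute_prizes_alt]
      simp only [if_neg (by omega : ¬ t ≤ 0)]
      rw [PySem.Int.floordiv_eq_ediv_of_pos hm, PySem.Int.mod_eq_emod_of_pos hm]
      by_cases hle : t ≤ m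
      · -- one final chunk of size t
        have hmin : min t m = t := min_eq_left hle
        rw [hmin]
        have hz : distributeLoop (t - t) m = [] := by
          rw [distributeLoop]; simp
        rw [hz]
        by_cases heq : t = m
        · subst heq
          have h1 : t / t = 1 := Int.ediv_self (by omega)
          simp [h1]
        · have hlt : t < m := lt_of_le_of_ne hle heq
          have hd : t / m = 0 := Int.ediv_eq_zero_of_lt (by omega) hlt
          have hr : t % m = t := Int.emod_eq_of_lt (by omega) hlt
          have htne : t ≠ 0 := by omega
          simp [hd, hr, htne]
      · -- full chunk of size m
        have hmlt : m < t := by omega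
        have hmin : min t m = m := min_eq_right (le_of_lt hmlt)
        rw [hmin]
        rw [ih (t - m) m (by omega) hm]
        rw [distribute_prizes_alt]
        simp only [if_neg (by omega : ¬ t - m ≤ 0)]
        rw [PySem.Int.floordiv_eq_ediv_of_pos hm, PySem.Int.mod_eq_emod_of_pos hm]
        have hdiv : t / m = (t - m) / m + 1 := by
          conv_lhs => rw [show t = t - m + 1 * m by ring]
          simpa using Int.add_mul_ediv_right (t - m) 1 (by omega : m ≠ 0)
        have hmod : t % m = (t - m) % m := by
          conv_lhs => rw [show t = t - m + 1 * m by ring]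
          exact Int.add_mul_emod_self_right (t - m) 1 m
        have hq : 0 ≤ (t - m) / m := Int.ediv_nonneg (by omega) (by omega)
        have hrep : (t / m).toNat = ((t - m) / m + 1).toNat := by rw [hdiv]
        rw [hrep, hmod]
        have : ((t - m) / m + 1).toNat = ((t - m) / m).toNat + 1 := by omega
        rw [this, List.replicate_succ]
        simp
    · have ht0 : t ≤ 0 := by omega
      have hg : ¬ (0 < t ∧ 0 < m) := by omega
      simp [distribute_prizes_alt, ht0, hg]

-- ===== VERDICT (by name: the statement is the Claim_ definition above) =====
theorem distribute_prizes_spec : Claim_equal_distribute_prizes := by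
  intro t m _ hpre
  unfold Spec_distribute_prizes distribute_prizes
  rcases hpre with h | h
  · have hg : ¬ (0 < t ∧ 0 < m) := by omega
    rw [distributeLoop]
    simp [distribute_prizes_alt, h, hg]
  · exact distributeLoop_eq_alt t.toNat t m le_rfl h
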